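-- pv_equiv track=rewrite | github.com/Amin-mashari/weblog | extensions/utils.py | persian_numbers_converter
-- ===== SOURCE A (Python) =====
-- def persian_numbers_converter(mystr):
--
--      numbers = {
--           "0":"۰",
--           "1":"۱",
--           "2":"۲",
--           "3":"۳",
--           "4":"۴",
--           "5":"۵",
--           "6":"۶",
--           "7":"۷",
--           "8":"۸",
--           "9":"۹"
--      }
--
--      for english, persian in numbers.items():
--           mystr = mystr.replace(english, persian)
--
--      return mystr
-- ===== SOURCE B (Python) =====
-- def persian_numbers_converter(mystr):
--      # single pass, no lookup table: Persian digits are a contiguous Unicode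
--      # block, so a digit is shifted by the constant offset 0x6F0 - 0x30 = 1728
--      out = []
--      for ch in mystr:
--           if '0' <= ch <= '9':
--                out.append(chr(ord(ch) + 1728))
--           else:
--                out.append(ch)
--      return ''.join(out)
-- ===== Notes on version B (the rewrite author's own statement) =====
-- stated objective: simpler
-- what changed: B drops the dict entirely: one pass over the characters, shifting any ASCII digit by the constant code-point offset 1728 (Persian digits are a contiguous Unicode block), instead of A's ten whole-string scan-and-replace passes over a lookup table.
import Mathlib
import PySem

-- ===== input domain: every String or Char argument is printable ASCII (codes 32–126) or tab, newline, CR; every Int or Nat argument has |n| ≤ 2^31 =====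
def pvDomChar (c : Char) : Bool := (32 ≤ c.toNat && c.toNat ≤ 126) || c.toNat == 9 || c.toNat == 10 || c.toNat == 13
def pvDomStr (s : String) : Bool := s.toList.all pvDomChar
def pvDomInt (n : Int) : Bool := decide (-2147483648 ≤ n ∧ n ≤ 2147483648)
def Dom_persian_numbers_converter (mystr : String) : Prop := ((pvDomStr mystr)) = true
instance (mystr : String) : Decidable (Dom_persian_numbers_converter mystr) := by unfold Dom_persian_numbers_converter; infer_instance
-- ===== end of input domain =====

-- B drops A's dict and its ten whole-string scan-and-replace passes: one pass over
-- the characters, shifting ASCII digits by the constant code-point offset 1728.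

-- ===== PORT A =====
-- numbers = { "0":"۰", …, "9":"۹" }
def pnNumbers : PySem.Dict String String :=
  PySem.Dict.mk [("0","۰"),("1","۱"),("2","۲"),("3","۳"),("4","۴"),
                 ("5","۵"),("6","۶"),("7","۷"),("8","۸"),("9","۹")]

-- for english, persian in numbers.items(): mystr = mystr.replace(english, persian)
def persian_numbers_converter (mystr : String) : String :=
  pnNumbers.items.foldl (fun s ep => PySem.Str.replace s ep.1 ep.2) mystr

-- ===== PORT B =====
-- out = []; for ch in mystr: append(chr(ord(ch)+1728)) if '0' <= ch <= '9' else append(ch)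
-- return ''.join(out)
def persian_numbers_converter_alt (mystr : String) : String :=
  String.ofList
    ((mystr.toList.foldl
        (fun out ch =>
          if '0' ≤ ch ∧ ch ≤ '9' then Char.ofNat (ch.toNat + 1728) :: out
          else ch :: out) []).reverse)

-- ===== PRECONDITION & SPEC =====
def Spec_persian_numbers_converter (mystr : String) (out : String) : Prop := out = persian_numbers_converter_alt mystr
instance (mystr : String) (out : String) : Decidable (Spec_persian_numbers_converter mystr out) := by unfold Spec_persian_numbers_converter; infer_instance

-- ===== CLAIM (what is proved, stated in full; the proofs are below) =====
def Claim_equal_persian_numbers_converter : Prop := ∀ (mystr : String), Dom_persian_numbers_converter mystr → Spec_persian_numbers_converter mystr (persian_numbers_converter mystr)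

-- ===== LEMMAS AND PROOFS =====

-- the character-level meaning of the whole conversion
def pvG (x : Char) : Char :=
  if x == '0' then '۰' else if x == '1' then '۱' else if x == '2' then '۲' else
  if x == '3' then '۳' else if x == '4' then '۴' else if x == '5' then '۵' else
  if x == '6' then '۶' else if x == '7' then '۷' else if x == '8' then '۸' else
  if x == '9' then '۹' else x

lemma pv_go_single (c d : Char) : ∀ (fuel : Nat) (l acc : List Char), l.length ≤ fuel →
    PySem.Chars.replace.go [c] [d] fuel l acc
      = acc.reverse ++ l.map (fun x => if x == c then d else x) := by
  intro fuel
  induction fuel with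
  | zero =>
    intro l acc h
    have : l = [] := List.eq_nil_of_length_eq_zero (Nat.le_zero.mp h)
    subst this
    simp [PySem.Chars.replace.go]
  | succ n ih =>
    intro l acc h
    cases l with
    | nil => simp [PySem.Chars.replace.go]
    | cons a t =>
      simp only [PySem.Chars.replace.go, List.isPrefixOf, Bool.and_true]
      have hlen : t.length ≤ n := by simpa using Nat.lt_succ_iff.mp (by simpa using h)
      by_cases hca : c = a
      · subst hca
        rw [if_pos (by simp)]
        simp only [List.length_cons, List.length_nil, Nat.zero_add, List.drop_succ_cons,
          List.drop_zero]
        rw [ih t ([d].reverse ++ acc) hlen]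
        simp
      · rw [if_neg (by simp [hca])]
        rw [ih t (a :: acc) hlen]
        have hac : (a == c) = false := beq_eq_false_iff_ne.mpr (fun hh => hca hh.symm)
        simp only [List.map_cons, hac, if_false, Bool.false_eq_true, List.reverse_cons,
          List.append_assoc, List.singleton_append]

lemma pv_replace_single (l : List Char) (c d : Char) :
    PySem.Chars.replace l [c] [d] = l.map (fun x => if x == c then d else x) := by
  simpa [PySem.Chars.replace] using pv_go_single c d l.length l [] (le_refl _)

lemma pv_point (x : Char) :
    ((fun y => if y == '9' then '۹' else y) ∘
      (fun y => if y == '8' then '۸' else y) ∘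
        (fun y => if y == '7' then '۷' else y) ∘
          (fun y => if y == '6' then '۶' else y) ∘
            (fun y => if y == '5' then '۵' else y) ∘
              (fun y => if y == '4' then '۴' else y) ∘
                (fun y => if y == '3' then '۳' else y) ∘
                  (fun y => if y == '2' then '۲' else y) ∘
                    (fun y => if y == '1' then '۱' else y) ∘
                      (fun y => if y == '0' then '۰' else y)) x = pvG x := by
  by_cases h0 : x = '0'; · subst h0; decide
  by_cases h1 : x = '1'; · subst h1; decide
  by_cases h2 : x = '2'; · subst h2; decide
  by_cases h3 : x = '3'; · subst h3; decide
  by_cases h4 : x = '4'; · subst h4; decide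
  by_cases h5 : x = '5'; · subst h5; decide
  by_cases h6 : x = '6'; · subst h6; decide
  by_cases h7 : x = '7'; · subst h7; decide
  by_cases h8 : x = '8'; · subst h8; decide
  by_cases h9 : x = '9'; · subst h9; decide
  simp [Function.comp, pvG, h0, h1, h2, h3, h4, h5, h6, h7, h8, h9]

lemma pv_A_toList (mystr : String) :
    (persian_numbers_converter mystr).toList = mystr.toList.map pvG := by
  have e0 : ("0":String).toList = ['0'] := rfl
  have e1 : ("1":String).toList = ['1'] := rfl
  have e2 : ("2":String).toList = ['2'] := rfl
  have e3 : ("3":String).toList = ['3'] := rfl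
  have e4 : ("4":String).toList = ['4'] := rfl
  have e5 : ("5":String).toList = ['5'] := rfl
  have e6 : ("6":String).toList = ['6'] := rfl
  have e7 : ("7":String).toList = ['7'] := rfl
  have e8 : ("8":String).toList = ['8'] := rfl
  have e9 : ("9":String).toList = ['9'] := rfl
  have p0 : ("۰":String).toList = ['۰'] := rfl
  have p1 : ("۱":String).toList = ['۱'] := rfl
  have p2 : ("۲":String).toList = ['۲'] := rfl
  have p3 : ("۳":String).toList = ['۳'] := rfl
  have p4 : ("۴":String).toList = ['۴'] := rfl
  have p5 : ("۵":String).toList = ['۵'] := rfl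
  have p6 : ("۶":String).toList = ['۶'] := rfl
  have p7 : ("۷":String).toList = ['۷'] := rfl
  have p8 : ("۸":String).toList = ['۸'] := rfl
  have p9 : ("۹":String).toList = ['۹'] := rfl
  simp only [persian_numbers_converter, pnNumbers, List.foldl_cons, List.foldl_nil]
  simp only [PySem.Str.toList_replace]
  simp only [e0, e1, e2, e3, e4, e5, e6, e7, e8, e9,
    p0, p1, p2, p3, p4, p5, p6, p7, p8, p9]
  simp only [pv_replace_single, List.map_map]
  exact List.map_congr_left (fun a _ => pv_point a)

-- B's per-character arithmetic agrees with the table meaning pvG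
lemma pvB_point (x : Char) :
    (if '0' ≤ x ∧ x ≤ '9' then Char.ofNat (x.toNat + 1728) else x) = pvG x := by
  by_cases h0 : x = '0'; · subst h0; decide
  by_cases h1 : x = '1'; · subst h1; decide
  by_cases h2 : x = '2'; · subst h2; decide
  by_cases h3 : x = '3'; · subst h3; decide
  by_cases h4 : x = '4'; · subst h4; decide
  by_cases h5 : x = '5'; · subst h5; decide
  by_cases h6 : x = '6'; · subst h6; decide
  by_cases h7 : x = '7'; · subst h7; decide
  by_cases h8 : x = '8'; · subst h8; decide
  by_cases h9 : x = '9'; · subst h9; decide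
  rw [if_neg, pvG]
  · simp [h0, h1, h2, h3, h4, h5, h6, h7, h8, h9]
  · rintro ⟨hl, hr⟩
    have hl' : 48 ≤ x.toNat := hl
    have hr' : x.toNat ≤ 57 := hr
    have hof := Char.ofNat_toNat x
    interval_cases h : x.toNat <;>
      first
      | exact h0 hof.symm | exact h1 hof.symm | exact h2 hof.symm | exact h3 hof.symm
      | exact h4 hof.symm | exact h5 hof.symm | exact h6 hof.symm | exact h7 hof.symm
      | exact h8 hof.symm | exact h9 hof.symm

-- the reversed-cons accumulator loop is a map
lemma pvB_fold : ∀ (l acc : List Char),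
    (l.foldl
        (fun out ch =>
          if '0' ≤ ch ∧ ch ≤ '9' then Char.ofNat (ch.toNat + 1728) :: out
          else ch :: out) acc).reverse
      = acc.reverse ++ l.map
          (fun ch => if '0' ≤ ch ∧ ch ≤ '9' then Char.ofNat (ch.toNat + 1728) else ch) := by
  intro l
  induction l with
  | nil => intro acc; simp
  | cons a t ih =>
    intro acc
    by_cases h : '0' ≤ a ∧ a ≤ '9' <;> simp [List.foldl_cons, h, ih]

lemma pv_B_toList (mystr : String) :
    (persian_numbers_converter_alt mystr).toList = mystr.toList.map pvG := by
  unfold persian_numbers_converter_alt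
  rw [String.toList_ofList]
  have := pvB_fold mystr.toList []
  simp only [List.reverse_nil, List.nil_append] at this
  rw [this]
  exact List.map_congr_left (fun a _ => pvB_point a)

-- ===== VERDICT (by name: the statement is the Claim_ definition above) =====
theorem persian_numbers_converter_spec : Claim_equal_persian_numbers_converter := by
  intro mystr _
  unfold Spec_persian_numbers_converter
  exact String.ext ((pv_A_toList mystr).trans (pv_B_toList mystr).symm)
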